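-- pv_equiv track=rewrite | github.com/libocca/occa | scripts/setup_kernel_operators.py | run_function_from_argument
-- ===== SOURCE A (Python) =====
-- def run_function_from_argument(N):
--     content  = '  case {N}:\n'.format(N=N)
--     content += '    f('
--     indent = ' ' * 6  # '    f('
--
--     for n in range(N):
--         content += 'args[{n}]'.format(n=n)
--         if n < (N - 1):
--             if (n + 1) % 5:
--                 content += ', '
--             else:
--                 content += ',\n' + indent
--     content += ');\n    break;\n'
--
--     return content
-- ===== SOURCE B (Python) =====
-- def run_function_from_argument(N):
--     tokens = ['args[%d]' % n for n in range(N)]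
--     chunks = [tokens[i:i+5] for i in range(0, len(tokens), 5)]
--     body = (',\n' + ' ' * 6).join(', '.join(chunk) for chunk in chunks)
--     return '  case %d:\n    f(%s);\n    break;\n' % (N, body)
-- ===== Notes on version B (the rewrite author's own statement) =====
-- stated objective: simpler
-- what changed: A appends token-by-token with a modular counter deciding each separator inline; B builds the token list, splits it into chunks of five and joins chunks with ', ' and groups with ',\n' plus the six-space indent.
import Mathlib
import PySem

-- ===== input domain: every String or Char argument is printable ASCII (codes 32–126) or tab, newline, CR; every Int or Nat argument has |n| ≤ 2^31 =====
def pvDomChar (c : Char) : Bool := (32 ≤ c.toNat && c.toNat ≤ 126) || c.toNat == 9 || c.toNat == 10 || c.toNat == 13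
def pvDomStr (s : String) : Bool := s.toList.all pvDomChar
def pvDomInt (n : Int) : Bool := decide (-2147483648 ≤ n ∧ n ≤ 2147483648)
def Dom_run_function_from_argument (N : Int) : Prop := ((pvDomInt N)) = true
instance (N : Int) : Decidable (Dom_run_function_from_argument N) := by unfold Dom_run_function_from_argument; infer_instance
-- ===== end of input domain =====

-- B replaces A's single-pass append loop with a modular counter by building the token
-- list, chunking it into groups of five and joining the groups (objective: simpler, same cost).

-- ===== PORT A =====
def run_function_from_argument (N : Int) : String :=
  let content := "  case " ++ PySem.Int.toStr N ++ ":\n"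
  let content := content ++ "    f("
  let indent := "      "   -- ' ' * 6
  let content := (PySem.List.pyRange 0 N 1).foldl (fun content n =>
      let content := content ++ "args[" ++ PySem.Int.toStr n ++ "]"
      if n < N - 1 then
        if PySem.Int.mod (n + 1) 5 ≠ 0 then content ++ ", "
        else content ++ ",\n" ++ indent
      else content) content
  content ++ ");\n    break;\n"

-- ===== PORT B =====
def run_function_from_argument_alt (N : Int) : String :=
  let tokens := (PySem.List.pyRange 0 N 1).map (fun n => "args[" ++ PySem.Int.toStr n ++ "]")
  let chunks := (PySem.List.pyRange 0 (tokens.length : Int) 5).map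
      (fun i => PySem.List.slice tokens (some i) (some (i + 5)))
  let body := PySem.Str.join (",\n" ++ "      ")
      (chunks.map (fun chunk => PySem.Str.join ", " chunk))
  "  case " ++ PySem.Int.toStr N ++ ":\n    f(" ++ body ++ ");\n    break;\n"

-- ===== PRECONDITION & SPEC =====
def Spec_run_function_from_argument (N : Int) (out : String) : Prop := out = run_function_from_argument_alt N
instance (N : Int) (out : String) : Decidable (Spec_run_function_from_argument N out) := by unfold Spec_run_function_from_argument; infer_instance

-- ===== CLAIM (what is proved, stated in full; the proofs are below) =====
def Claim_equal_run_function_from_argument : Prop := ∀ (N : Int), Dom_run_function_from_argument N → Spec_run_function_from_argument N (run_function_from_argument N)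

-- ===== LEMMAS AND PROOFS =====

-- the argument token at natural index j, and the two separators, on the List Char side
def tokS (j : Nat) : String := "args[" ++ PySem.Int.toStr (j : Int) ++ "]"
def smallSep : List Char := ", ".toList
def bigSep : List Char := ",\n".toList ++ "      ".toList

-- the character list A's loop appends after the opening "    f(" when N = m, starting at token k
def aBody (m k : Nat) : List Char :=
  if _h : k < m then
    (tokS k).toList ++
      (if k + 1 < m then (if (k + 1) % 5 ≠ 0 then smallSep else bigSep) else []) ++
      aBody m (k + 1)
  else []
termination_by m - k

lemma range'_take (j : Nat) : ∀ (s n : Nat), (List.range' s n).take j = List.range' s (min j n) := by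
  induction j with
  | zero => intro s n; simp
  | succ j ih =>
    intro s n
    cases n with
    | zero => simp
    | succ n =>
      rw [List.range'_succ, List.take_succ_cons, ih]
      have h : min (j + 1) (n + 1) = min j n + 1 := by omega
      rw [h, List.range'_succ]

lemma range'_drop (j : Nat) : ∀ (s n : Nat), (List.range' s n).drop j = List.range' (s + j) (n - j) := by
  induction j with
  | zero => intro s n; simp
  | succ j ih =>
    intro s n
    cases n with
    | zero => simp
    | succ n =>
      rw [List.range'_succ, List.drop_succ_cons, ih]
      congr 1 <;> omega

-- A's fold appends a per-token string; pull it out as a flatMap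
lemma foldA_eq (N : Int) (l : List Int) (acc : String) :
    (l.foldl (fun content n =>
        let content := content ++ "args[" ++ PySem.Int.toStr n ++ "]"
        if n < N - 1 then
          if PySem.Int.mod (n + 1) 5 ≠ 0 then content ++ ", "
          else content ++ ",\n" ++ "      "
        else content) acc).toList
    = acc.toList ++ l.flatMap (fun n =>
        ("args[" ++ PySem.Int.toStr n ++ "]").toList ++
        (if n < N - 1 then (if PySem.Int.mod (n + 1) 5 ≠ 0 then smallSep else bigSep) else [])) := by
  induction l generalizing acc with
  | nil => simp
  | cons a t ih =>
    simp only [List.foldl_cons, List.flatMap_cons]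
    rw [ih]
    by_cases h1 : a < N - 1
    · by_cases h2 : (5 : Int) ∣ a + 1 <;>
        simp [h1, h2, smallSep, bigSep, String.toList_append]
    · simp [h1, String.toList_append]

-- the flatMap over naturals is aBody
lemma flat_nat (m : Nat) : ∀ (d k : Nat), m - k = d →
    (List.range' k (m - k)).flatMap (fun j =>
        (tokS j).toList ++
        (if j + 1 < m then (if (j + 1) % 5 ≠ 0 then smallSep else bigSep) else []))
      = aBody m k := by
  intro d
  induction d with
  | zero =>
    intro k hd
    rw [aBody]
    have hk : ¬ k < m := by omega
    simp [hd, hk]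
  | succ d ih =>
    intro k hd
    have hk : k < m := by omega
    have h2 : m - (k + 1) = d := by omega
    rw [hd, List.range'_succ, List.flatMap_cons, ← h2, ih (k + 1) h2]
    conv_rhs => rw [aBody]
    rw [dif_pos hk]

-- the Int-side flatMap (over pyRange) equals the Nat-side one when N = ↑m
lemma flat_int (m : Nat) :
    (PySem.List.pyRange 0 (↑m) 1).flatMap (fun n =>
        ("args[" ++ PySem.Int.toStr n ++ "]").toList ++
        (if n < (↑m : Int) - 1 then (if PySem.Int.mod (n + 1) 5 ≠ 0 then smallSep else bigSep) else []))
    = (List.range' 0 m).flatMap (fun j =>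
        (tokS j).toList ++
        (if j + 1 < m then (if (j + 1) % 5 ≠ 0 then smallSep else bigSep) else [])) := by
  rw [PySem.List.pyRange_one]
  have hm : ((↑m : Int) - 0).toNat = m := by omega
  rw [hm, ← List.range_eq_range', List.flatMap_map]
  refine congrArg (fun f => List.flatMap f (List.range m)) (funext fun j => ?_)
  simp only [zero_add, tokS]
  by_cases hj : j + 1 < m
  · have hj' : (j : Int) < (m : Int) - 1 := by omega
    rw [if_pos hj, if_pos hj']
    have hmod : PySem.Int.mod ((j : Int) + 1) 5 = (((j + 1) % 5 : Nat) : Int) := by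
      have h1 : ((j : Int) + 1) = ((j + 1 : Nat) : Int) := by push_cast; ring
      rw [h1]
      exact_mod_cast PySem.Int.mod_natCast (j + 1) 5
    rw [hmod]
    simp only [ne_eq, Int.natCast_eq_zero]
  · have hj' : ¬ (j : Int) < (m : Int) - 1 := by omega
    rw [if_neg hj, if_neg hj']

-- B's token list is the Nat-side token list
lemma tokens_eq (m : Nat) :
    (PySem.List.pyRange 0 (↑m) 1).map (fun n => "args[" ++ PySem.Int.toStr n ++ "]")
      = (List.range' 0 m).map tokS := by
  rw [PySem.List.pyRange_one]
  have hm : ((↑m : Int) - 0).toNat = m := by omega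
  rw [hm, ← List.range_eq_range', List.map_map]
  apply List.map_congr_left
  intro j _
  simp [tokS]

-- proof-side view of B's chunk comprehension: recursive take-5 / drop-5 splitting
def chunksRec : List String → List (List String)
  | [] => []
  | x :: rest => (x :: rest).take 5 :: chunksRec ((x :: rest).drop 5)
termination_by xs => xs.length
decreasing_by simp

-- B's chunk comprehension, pointwise, as take-of-drop over chunk indices
lemma comp_to_chunks (xs : List String) :
    (PySem.List.pyRange 0 (xs.length : Int) 5).map
        (fun i => PySem.List.slice xs (some i) (some (i + 5)))
      = (List.range ((xs.length + 4) / 5)).map (fun k => (xs.drop (5 * k)).take 5) := by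
  rw [PySem.List.pyRange_of_pos _ _ (by norm_num : (0:Int) < 5), List.map_map]
  have hcount : (if (0:Int) < (xs.length : Int)
        then (((xs.length : Int) - 0 + 5 - 1) / 5).toNat else 0) = (xs.length + 4) / 5 := by
    rcases Nat.eq_zero_or_pos xs.length with h | h
    · rw [h]; norm_num
    · rw [if_pos (by exact_mod_cast h)]
      omega
  rw [hcount]
  apply List.map_congr_left
  intro k _
  simp only [Function.comp_apply]
  have h2 : ((0:Int) + 5 * (k:Int) + 5) = ((5 * k + 5 : Nat) : Int) := by push_cast; ring
  have h1 : ((0:Int) + 5 * (k:Int)) = ((5 * k : Nat) : Int) := by push_cast; ring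
  rw [h2, h1, PySem.List.slice_natCast, show 5 * k + 5 - 5 * k = 5 from by omega]

-- the indexed chunks are the recursive take-5 / drop-5 chunks
lemma chunks_form (L : Nat) : ∀ xs : List String, xs.length = L →
    (List.range ((xs.length + 4) / 5)).map (fun k => (xs.drop (5 * k)).take 5)
      = chunksRec xs := by
  induction L using Nat.strong_induction_on with
  | _ L ih =>
  intro xs hL
  cases xs with
  | nil => simp [chunksRec]
  | cons x rest =>
    obtain ⟨c, hcp⟩ : ∃ c, ((x :: rest).length + 4) / 5 = c + 1 :=
      ⟨((x :: rest).length + 4) / 5 - 1, by simp; omega⟩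
    rw [hcp, List.range_succ_eq_map, List.map_cons, List.map_map, chunksRec]
    congr 1
    have hLr : rest.length + 1 = L := by simpa using hL
    have ihh := ih (((x :: rest).drop 5).length) (by simp; omega) ((x :: rest).drop 5) rfl
    rw [← ihh]
    have hcnt : (((x :: rest).drop 5).length + 4) / 5 = c := by
      simp at hcp ⊢
      omega
    rw [hcnt]
    apply List.map_congr_left
    intro k _
    simp only [Function.comp_apply]
    rw [show 5 * Nat.succ k = 5 + 5 * k from by omega, ← List.drop_drop]

-- B's chunk comprehension is chunksRec
lemma comp_eq (xs : List String) :
    (PySem.List.pyRange 0 (xs.length : Int) 5).map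
        (fun i => PySem.List.slice xs (some i) (some (i + 5)))
      = chunksRec xs := by
  rw [comp_to_chunks]
  exact chunks_form xs.length xs rfl

-- running through one chunk of at most five tokens: all ", " separators, then the
-- chunk break (or the end of the argument list)
lemma run5 (r : Nat) : ∀ (k m : Nat), 0 < r → r ≤ 5 → k % 5 = 5 - r → k < m →
    aBody m k
      = PySem.Chars.join smallSep ((List.range' k (min r (m - k))).map (fun j => (tokS j).toList))
        ++ (if k + r < m then bigSep ++ aBody m (k + r) else []) := by
  induction r with
  | zero => intro k m h0 _ _ _; exact absurd h0 (by omega)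
  | succ r ih =>
    intro k m _ hr5 hk5 hkm
    rw [aBody, dif_pos hkm]
    by_cases hlast : k + 1 < m
    · by_cases hmod : (k + 1) % 5 ≠ 0
      · have hrpos : 0 < r := by omega
        rw [if_pos hlast, if_pos hmod]
        rw [ih (k + 1) m hrpos (by omega) (by omega) hlast]
        have hmin : min (r + 1) (m - k) = (min r (m - (k + 1))) + 1 := by omega
        obtain ⟨t, ht⟩ : ∃ t, min r (m - (k + 1)) = t + 1 :=
          ⟨min r (m - (k + 1)) - 1, by omega⟩
        rw [hmin, List.range'_succ, List.map_cons]
        rw [ht, List.range'_succ, List.map_cons]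
        rw [PySem.Chars.join_cons_cons]
        have hadd : k + (r + 1) = k + 1 + r := by omega
        rw [hadd]
        simp [List.append_assoc]
      · have hmod' : (k + 1) % 5 = 0 := by omega
        have hr0 : r = 0 := by omega
        subst hr0
        rw [if_pos hlast, if_neg (by omega : ¬ (k + 1) % 5 ≠ 0)]
        have hmin : min 1 (m - k) = 1 := by omega
        rw [hmin, List.range'_one, List.map_singleton, PySem.Chars.join_singleton,
          if_pos (by omega : k + 1 < m)]
        simp [List.append_assoc]
    · rw [if_neg hlast]
      have hmin : min (r + 1) (m - k) = 1 := by omega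
      rw [hmin, List.range'_one, List.map_singleton, PySem.Chars.join_singleton,
        if_neg (by omega : ¬ k + (r + 1) < m)]
      have hz : aBody m (k + 1) = [] := by
        rw [aBody, dif_neg (by omega : ¬ k + 1 < m)]
      rw [hz]
      simp

-- the chunk-and-join of the tokens from k on equals aBody, at every chunk boundary
lemma chunks_eq_aBody (d : Nat) : ∀ (m k : Nat), m - k = d → k % 5 = 0 → k < m →
    PySem.Chars.join bigSep
        ((chunksRec ((List.range' k (m - k)).map tokS)).map
          (fun c => PySem.Chars.join smallSep (c.map String.toList)))
      = aBody m k := by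
  induction d using Nat.strong_induction_on with
  | _ d ih =>
  intro m k hd hk5 hkm
  have h5 := run5 5 k m (by omega) (by omega) (by omega) hkm
  obtain ⟨e, he⟩ : ∃ e, m - k = e + 1 := ⟨m - k - 1, by omega⟩
  have hcons : (List.range' k (m - k)).map tokS
      = tokS k :: ((List.range' (k + 1) e).map tokS) := by
    rw [he, List.range'_succ, List.map_cons]
  rw [hcons, chunksRec, ← hcons]
  rw [← List.map_take, ← List.map_drop, range'_take, range'_drop]
  by_cases hbig : k + 5 < m
  · -- at least two chunks
    obtain ⟨e2, he2⟩ : ∃ e2, m - k - 5 = e2 + 1 := ⟨m - k - 5 - 1, by omega⟩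
    have htail : (List.range' (k + 5) (m - k - 5)).map tokS
        = tokS (k + 5) :: ((List.range' (k + 5 + 1) e2).map tokS) := by
      rw [he2, List.range'_succ, List.map_cons]
    have hih := ih (m - (k + 5)) (by omega) m (k + 5) rfl (by omega) (by omega)
    rw [show m - (k + 5) = m - k - 5 from by omega] at hih
    rcases hpc : chunksRec ((List.range' (k + 5) (m - k - 5)).map tokS) with _ | ⟨c2, cs⟩
    · rw [htail, chunksRec] at hpc
      exact absurd hpc (by simp)
    · rw [List.map_cons, List.map_cons, PySem.Chars.join_cons_cons]
      rw [hpc, List.map_cons] at hih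
      rw [hih, h5, if_pos hbig]
      simp [Function.comp_def, List.append_assoc]
  · -- a single final chunk
    have hdrop : m - k - 5 = 0 := by omega
    rw [hdrop]
    simp only [List.range'_zero, List.map_nil, chunksRec, List.map_cons, List.map_nil,
      PySem.Chars.join_singleton]
    rw [h5, if_neg hbig]
    simp [Function.comp_def]

lemma A_toList (m : Nat) :
    (run_function_from_argument (↑m)).toList
      = "  case ".toList ++ (PySem.Int.toStr (↑m : Int)).toList ++ ":\n".toList ++
        "    f(".toList ++ aBody m 0 ++ ");\n    break;\n".toList := by
  simp only [run_function_from_argument, String.toList_append, List.append_assoc]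
  rw [foldA_eq, flat_int m]
  rw [show (List.range' 0 m).flatMap (fun j =>
        (tokS j).toList ++
        (if j + 1 < m then (if (j + 1) % 5 ≠ 0 then smallSep else bigSep) else []))
      = aBody m 0 from by rw [← flat_nat m m 0 (by omega)]; rfl]
  simp [String.toList_append, List.append_assoc]

lemma B_toList (m : Nat) :
    (run_function_from_argument_alt (↑m)).toList
      = "  case ".toList ++ (PySem.Int.toStr (↑m : Int)).toList ++ ":\n".toList ++
        "    f(".toList ++ aBody m 0 ++ ");\n    break;\n".toList := by
  simp only [run_function_from_argument_alt, String.toList_append, List.append_assoc,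
    PySem.Str.toList_join]
  rw [tokens_eq m, comp_eq, List.map_map]
  rw [show ",\n".toList ++ "      ".toList = bigSep from rfl]
  rw [show (String.toList ∘ fun chunk => PySem.Str.join ", " chunk)
        = fun c => PySem.Chars.join smallSep (c.map String.toList) from by
      funext c
      simp only [Function.comp_apply, PySem.Str.toList_join]
      rfl]
  rw [show ":\n    f(".toList = ":\n".toList ++ "    f(".toList from by decide]
  rcases Nat.eq_zero_or_pos m with hm | hm
  · subst hm
    rw [show aBody 0 0 = [] from by rw [aBody, dif_neg (by omega)]]
    simp [List.range'_zero, chunksRec, PySem.Chars.join_nil]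
  · rw [show (List.range' 0 m).map tokS = (List.range' 0 (m - 0)).map tokS from by
        rw [Nat.sub_zero]]
    rw [chunks_eq_aBody m m 0 (by omega) (by omega) hm]
    simp

lemma neg_case (N : Int) (hN : N < 0) :
    (run_function_from_argument N).toList = (run_function_from_argument_alt N).toList := by
  simp only [run_function_from_argument, run_function_from_argument_alt,
    PySem.List.pyRange_one_eq_nil (by omega : N ≤ 0), List.foldl_nil, List.map_nil]
  rw [comp_eq]
  simp only [chunksRec, List.map_nil, PySem.Str.toList_join, PySem.Chars.join_nil,
    String.toList_append, List.append_assoc]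
  rw [show ":\n    f(".toList = ":\n".toList ++ "    f(".toList from by decide]
  simp

-- ===== VERDICT (by name: the statement is the Claim_ definition above) =====
theorem run_function_from_argument_spec : Claim_equal_run_function_from_argument := by
  intro N _
  unfold Spec_run_function_from_argument
  apply String.toList_inj.mp
  by_cases h : 0 ≤ N
  · obtain ⟨m, rfl⟩ : ∃ m : Nat, N = ↑m := ⟨N.toNat, by omega⟩
    rw [A_toList, B_toList]
  · exact neg_case N (by omega)
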